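-- pv_equiv track=rewrite | github.com/EPmaple/ragnawebsite-third-version | helpers.py | most_streak_names
-- ===== SOURCE A (Python) =====
-- def most_streak_names(dict):
--   max_streak = 0
--   current_streak = 0
--   current_streak_name = None
--   most_streak_names = []
--
--   for names in dict.values():
--     for name in names:
--       name = name.lower()
--       if name == current_streak_name:
--         current_streak += 1
--       else: # name != current_streak_name
--         current_streak = 1
--         current_streak_name = name
--
--       if current_streak > max_streak:
--         max_streak = current_streak
--         most_streak_names = [current_streak_name]
--       elif current_streak == max_streak:
--         most_streak_names.append(current_streak_name)
--
--   return most_streak_names, max_streak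
-- ===== SOURCE B (Python) =====
-- def most_streak_names(dict):
--   # Run-length encode the concatenated, lowercased name stream, then
--   # select the names of the runs whose length equals the maximum length.
--   runs = []
--   for names in dict.values():
--     for name in names:
--       name = name.lower()
--       if runs and runs[-1][0] == name:
--         runs[-1][1] += 1
--       else:
--         runs.append([name, 1])
--   m = max((l for _, l in runs), default=0)
--   return [k for k, l in runs if l == m], m
-- ===== Notes on version B (the rewrite author's own statement) =====
-- stated objective: alternative
-- what changed: A tracks max-streak, current-streak and the tie list incrementally in one stateful scan; B first run-length-encodes the concatenated lowercased name stream and then selects the names of the runs whose length equals the maximum.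
import Mathlib
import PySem

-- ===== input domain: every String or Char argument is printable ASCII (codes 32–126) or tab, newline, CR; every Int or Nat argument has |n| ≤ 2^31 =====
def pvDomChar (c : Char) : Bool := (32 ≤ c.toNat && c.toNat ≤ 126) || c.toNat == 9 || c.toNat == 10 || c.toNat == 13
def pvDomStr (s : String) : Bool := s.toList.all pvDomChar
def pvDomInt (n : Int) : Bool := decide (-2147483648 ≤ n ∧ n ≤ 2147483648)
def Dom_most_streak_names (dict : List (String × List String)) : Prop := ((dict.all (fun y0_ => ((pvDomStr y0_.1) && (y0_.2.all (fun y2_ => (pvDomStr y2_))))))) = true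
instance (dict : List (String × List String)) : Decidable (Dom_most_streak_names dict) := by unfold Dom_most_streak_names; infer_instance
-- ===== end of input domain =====

-- B replaces A's incremental streak/max/tie bookkeeping by a build-the-run-length-encoding-then-select
-- decomposition (same asymptotic cost, different algorithmic structure).


-- ===== PORT A =====
-- loop body of A; state = (max_streak, current_streak, current_streak_name, most_streak_names).
-- After Python's first `if`, current_streak_name equals the lowercased name `n` in both branches
-- (kept unchanged when equal, assigned `n` otherwise), so the state update stores `some n`.
def pvStepA (st : Int × Int × Option String × List String) (name : String) :
    Int × Int × Option String × List String :=
  let n := PySem.Str.lower name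
  match st with
  | (maxS, curS, curN, msn) =>
    let curS := if some n == curN then curS + 1 else 1
    if curS > maxS then (curS, curS, some n, [n])
    else if curS == maxS then (maxS, curS, some n, msn ++ [n])
    else (maxS, curS, some n, msn)

def most_streak_names (dict : List (String × List String)) : List String × Int :=
  let st := dict.foldl (fun st p => p.2.foldl pvStepA st) (0, 0, none, [])
  (st.2.2.2, st.1)

-- ===== PORT B =====
-- Source B loop body: extend the run-length encoding by one (lowercased) name.
def pvBump (runs : List (String × Int)) (name : String) : List (String × Int) :=
  match runs.getLast? with
  | some (p, c) =>
      if p == name then runs.dropLast ++ [(p, c + 1)] else runs ++ [(name, 1)]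
  | none => [(name, 1)]

-- Source B: build the RLE of the concatenated lowercased stream, then select names of maximal runs.
-- `max(…, default=0)` is ported as a 0-seeded max fold: all run lengths are ≥ 1, so they agree.
def most_streak_names_alt (dict : List (String × List String)) : List String × Int :=
  let runs := dict.foldl
    (fun rs p => p.2.foldl (fun rs name => pvBump rs (PySem.Str.lower name)) rs) []
  let m := runs.foldl (fun a q => max a q.2) 0
  ((runs.filter (fun q => q.2 == m)).map Prod.fst, m)

-- ===== PRECONDITION & SPEC =====
def Spec_most_streak_names (dict : List (String × List String)) (out : List String × Int) : Prop := out = most_streak_names_alt dict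
instance (dict : List (String × List String)) (out : List String × Int) : Decidable (Spec_most_streak_names dict out) := by unfold Spec_most_streak_names; infer_instance

-- ===== CLAIM (what is proved, stated in full; the proofs are below) =====
def Claim_equal_most_streak_names : Prop := ∀ (dict : List (String × List String)), Dom_most_streak_names dict → Spec_most_streak_names dict (most_streak_names dict)

-- ===== LEMMAS AND PROOFS =====

-- maximum run length of an RLE list (B's `m`)
def pvMaxC (rs : List (String × Int)) : Int := rs.foldl (fun a q => max a q.2) 0
-- names of runs of length m (B's selection)
def pvSel (rs : List (String × Int)) (m : Int) : List String :=
  (rs.filter (fun q => q.2 == m)).map Prod.fst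
-- A's loop state as a function of B's RLE of the same prefix
def pvState (rs : List (String × Int)) : Int × Int × Option String × List String :=
  (pvMaxC rs, ((rs.getLast?).map Prod.snd).getD 0, (rs.getLast?).map Prod.fst,
    pvSel rs (pvMaxC rs))

theorem pvMaxC_concat (rs : List (String × Int)) (q : String × Int) :
    pvMaxC (rs ++ [q]) = max (pvMaxC rs) q.2 := by
  simp [pvMaxC, List.foldl_append]

theorem pvMaxC_mem_le (rs : List (String × Int)) (q : String × Int) (h : q ∈ rs) :
    q.2 ≤ pvMaxC rs := by
  have := (PySem.List.le_foldl_max (rs.map Prod.snd) (0 : Int)).2 q.2 (List.mem_map_of_mem h)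
  simpa [pvMaxC, List.foldl_map] using this

theorem pvSel_concat (rs : List (String × Int)) (q : String × Int) (m : Int) :
    pvSel (rs ++ [q]) m = pvSel rs m ++ (if q.2 = m then [q.1] else []) := by
  by_cases h : q.2 = m <;> simp [pvSel, List.filter_append, h]

theorem pvSel_eq_nil (rs : List (String × Int)) (m : Int)
    (h : ∀ q ∈ rs, q.2 < m) : pvSel rs m = [] := by
  simp only [pvSel, List.map_eq_nil_iff, List.filter_eq_nil_iff]
  intro q hq
  have := h q hq
  simp only [beq_iff_eq]
  omega

-- one step of A's loop, seen through B's RLE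
theorem pvStep_state (rs : List (String × Int)) (x : String) :
    pvStepA (pvState rs) x = pvState (pvBump rs (PySem.Str.lower x)) := by
  rcases List.eq_nil_or_concat' rs with rfl | ⟨init, ⟨p, c⟩, rfl⟩
  · simp [pvStepA, pvBump, pvState, pvMaxC, pvSel]
  · have hM : pvMaxC (init ++ [(p, c)]) = max (pvMaxC init) c := pvMaxC_concat _ _
    have hM0 : ∀ q ∈ init, q.2 ≤ pvMaxC init := fun q hq => pvMaxC_mem_le init q hq
    by_cases hn : PySem.Str.lower x = p
    · -- same name as the last run: its length grows by one
      have hbump : pvBump (init ++ [(p, c)]) (PySem.Str.lower x) = init ++ [(p, c + 1)] := by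
        simp [pvBump, hn]
      rw [hbump]
      have hM' : pvMaxC (init ++ [(p, c + 1)]) = max (pvMaxC init) (c + 1) := pvMaxC_concat _ _
      simp only [pvState, List.getLast?_concat, Option.map_some, Option.getD_some]
      simp only [pvStepA, hn, beq_self_eq_true, if_true]
      rcases lt_trichotomy (pvMaxC (init ++ [(p, c)])) (c + 1) with hlt | heq | hgt
      · have h1 : pvMaxC init < c + 1 := by rw [hM] at hlt; omega
        rw [if_pos (by omega)]
        have h2 : pvMaxC (init ++ [(p, c + 1)]) = c + 1 := by rw [hM']; omega
        rw [h2, pvSel_concat, pvSel_eq_nil init (c + 1) (fun q hq => by have := hM0 q hq; omega)]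
        simp
      · have h1 : pvMaxC init = c + 1 := by rw [hM] at heq; omega
        rw [if_neg (by omega), if_pos (by simp only [beq_iff_eq]; omega)]
        have hMeq : pvMaxC (init ++ [(p, c + 1)]) = pvMaxC (init ++ [(p, c)]) := by
          rw [hM', hM]; omega
        rw [hMeq, pvSel_concat, pvSel_concat, if_neg (by omega), if_pos (by omega)]
        simp
      · have h1 : c + 1 < pvMaxC init := by rw [hM] at hgt; omega
        rw [if_neg (by omega), if_neg (by simp only [beq_iff_eq]; omega)]
        have hMeq : pvMaxC (init ++ [(p, c + 1)]) = pvMaxC (init ++ [(p, c)]) := by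
          rw [hM', hM]; omega
        rw [hMeq, pvSel_concat, pvSel_concat, if_neg (by omega), if_neg (by omega)]
    · -- different name: a new run of length 1 starts
      have hpn : (p == PySem.Str.lower x) = false := by
        simp only [beq_eq_false_iff_ne]; exact fun h => hn h.symm
      have hbump : pvBump (init ++ [(p, c)]) (PySem.Str.lower x)
          = (init ++ [(p, c)]) ++ [(PySem.Str.lower x, 1)] := by
        simp [pvBump, hpn]
      rw [hbump]
      have hcond : (some (PySem.Str.lower x) == some p) = false := by
        simp only [beq_eq_false_iff_ne, ne_eq, Option.some.injEq]; exact hn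
      have hM' : pvMaxC ((init ++ [(p, c)]) ++ [(PySem.Str.lower x, 1)])
          = max (pvMaxC (init ++ [(p, c)])) 1 := pvMaxC_concat _ _
      simp only [pvState, List.getLast?_concat, Option.map_some, Option.getD_some]
      simp only [pvStepA, hcond, Bool.false_eq_true, if_false]
      rcases lt_trichotomy (pvMaxC (init ++ [(p, c)])) 1 with hlt | heq | hgt
      · rw [if_pos (by omega)]
        have h2 : pvMaxC ((init ++ [(p, c)]) ++ [(PySem.Str.lower x, 1)]) = 1 := by
          rw [hM']; omega
        rw [h2, pvSel_concat, pvSel_eq_nil (init ++ [(p, c)]) 1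
          (fun q hq => by have := pvMaxC_mem_le _ q hq; omega)]
        simp
      · rw [if_neg (by omega), if_pos (by simp only [beq_iff_eq]; omega)]
        have h2 : pvMaxC ((init ++ [(p, c)]) ++ [(PySem.Str.lower x, 1)])
            = pvMaxC (init ++ [(p, c)]) := by rw [hM']; omega
        rw [h2]
        conv_rhs => rw [pvSel_concat]
        rw [if_pos (show (1 : Int) = pvMaxC (init ++ [(p, c)]) from heq.symm)]
      · rw [if_neg (by omega), if_neg (by simp only [beq_iff_eq]; omega)]
        have h2 : pvMaxC ((init ++ [(p, c)]) ++ [(PySem.Str.lower x, 1)])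
            = pvMaxC (init ++ [(p, c)]) := by rw [hM']; omega
        rw [h2]
        conv_rhs => rw [pvSel_concat]
        rw [if_neg (by omega)]
        simp

theorem pvFold_names (xs : List String) (rs : List (String × Int)) :
    xs.foldl pvStepA (pvState rs)
      = pvState (xs.foldl (fun rs name => pvBump rs (PySem.Str.lower name)) rs) := by
  induction xs generalizing rs with
  | nil => rfl
  | cons x xs ih => simp only [List.foldl_cons, pvStep_state, ih]

theorem pvFold_dict (d : List (String × List String)) (rs : List (String × Int)) :
    d.foldl (fun st p => p.2.foldl pvStepA st) (pvState rs)
      = pvState (d.foldl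
          (fun rs p => p.2.foldl (fun rs name => pvBump rs (PySem.Str.lower name)) rs) rs) := by
  induction d generalizing rs with
  | nil => rfl
  | cons q d ih => simp only [List.foldl_cons, pvFold_names, ih]

-- ===== VERDICT (by name: the statement is the Claim_ definition above) =====
theorem most_streak_names_spec : Claim_equal_most_streak_names := by
  intro dict _
  show most_streak_names dict = most_streak_names_alt dict
  have h0 : pvState [] = ((0 : Int), (0 : Int), (none : Option String), ([] : List String)) := rfl
  simp only [most_streak_names, most_streak_names_alt, ← h0, pvFold_dict]
  rfl
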